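-- pv_equiv track=rewrite | github.com/hussainmudassir/ECE-6913 | final.py | int_to_bitstr
-- ===== SOURCE A (Python) =====
-- def int_to_bitstr(bit: int) ->str:
--     if type(bit) != int:
--         if type(bit) ==  str:
--             while len(bit) < 32:
--                 bit = '0' + bit
--             return bit
--         else:
--             raise Exception('The input is neither a int nor a string')
--     if bit < 0 :
--         reverse_bit = -bit - 1
--         reverse_bitstr = bin(reverse_bit)[2:]
--         bitstr = ''
--         for bit in reverse_bitstr:
--             if bit == '1':
--                 bitstr += '0'
--             else:
--                 bitstr += '1'
--
--         if len(bitstr) > 32: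
--             bitstr = bitstr[-32:]
--         while len(bitstr) < 32:
--             bitstr = '1' + bitstr
--     else:
--         bitstr = bin(bit)[2:]
--         if len(bitstr) > 32:
--             bitstr = bitstr[-32:]
--
--         while len(bitstr) < 32:
--             bitstr = '0' + bitstr
--     return bitstr
-- ===== SOURCE B (Python) =====
-- def int_to_bitstr(bit: int) -> str:
--     if type(bit) == int:
--         return format(bit % 0x100000000, '032b')
--     if type(bit) == str:
--         return bit.rjust(32, '0')
--     raise Exception('The input is neither a int nor a string')
-- ===== Notes on version B (the rewrite author's own statement) =====
-- stated objective: simpler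
-- what changed: Replaced A's digit-building loop, manual bit-flip pass for negatives and while-loop padding with a single closed-form format(bit % 2**32, '032b'), and the string pad loop with rjust.
import Mathlib
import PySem

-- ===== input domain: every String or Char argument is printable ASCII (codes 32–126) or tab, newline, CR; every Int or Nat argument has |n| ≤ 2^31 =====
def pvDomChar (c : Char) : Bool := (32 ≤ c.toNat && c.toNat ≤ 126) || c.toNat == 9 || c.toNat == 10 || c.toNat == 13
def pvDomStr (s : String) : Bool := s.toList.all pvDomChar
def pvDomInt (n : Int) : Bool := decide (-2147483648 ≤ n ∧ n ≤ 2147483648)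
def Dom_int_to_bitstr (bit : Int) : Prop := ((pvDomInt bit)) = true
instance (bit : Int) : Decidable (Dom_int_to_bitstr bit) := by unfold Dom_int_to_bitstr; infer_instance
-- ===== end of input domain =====

-- B replaces A's digit loop, bit-flip pass and while-loop padding with the single closed form
-- format(bit % 2**32, '032b'); with an Int argument A's str branch and its raise are unreachable
-- and are not ported.

-- ===== PORT A =====
-- bin(n)[2:] for n > 0, built digit by digit as Python's bin produces them (MSB first)
def pvBinNat (n : Nat) : List Char :=
  if h : n = 0 then []
  else pvBinNat (n / 2) ++ [if n % 2 = 1 then '1' else '0']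
decreasing_by exact Nat.div_lt_self (Nat.pos_of_ne_zero h) one_lt_two

-- the 'while len(bitstr) < 32: bitstr = c + bitstr' loop
def pvPad (c : Char) (s : List Char) : List Char :=
  if s.length < 32 then pvPad c (c :: s) else s
termination_by 32 - s.length
decreasing_by simp [List.length_cons]; omega

def int_to_bitstr (bit : Int) : String :=
  if bit < 0 then
    let reverse_bit := (-bit - 1).toNat
    let reverse_bitstr := if reverse_bit = 0 then ['0'] else pvBinNat reverse_bit
    let bitstr := reverse_bitstr.foldl (fun acc c => acc ++ [if c = '1' then '0' else '1']) []
    let bitstr := if bitstr.length > 32 then PySem.List.slice bitstr (some (-32)) none else bitstr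
    String.ofList (pvPad '1' bitstr)
  else
    let bitstr := if bit.toNat = 0 then ['0'] else pvBinNat bit.toNat
    let bitstr := if bitstr.length > 32 then PySem.List.slice bitstr (some (-32)) none else bitstr
    String.ofList (pvPad '0' bitstr)

-- ===== PORT B =====
-- format(m, '0{w}b'): the w-digit zero-padded binary representation of m (exact for m < 2^w)
def pvFmtBits : Nat → Nat → List Char
  | 0, _ => []
  | (w+1), m => pvFmtBits w (m / 2) ++ [if m % 2 = 1 then '1' else '0']

def int_to_bitstr_alt (bit : Int) : String :=
  String.ofList (pvFmtBits 32 (PySem.Int.mod bit 4294967296).toNat)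

-- ===== PRECONDITION & SPEC =====
def Spec_int_to_bitstr (bit : Int) (out : String) : Prop := out = int_to_bitstr_alt bit
instance (bit : Int) (out : String) : Decidable (Spec_int_to_bitstr bit out) := by unfold Spec_int_to_bitstr; infer_instance

-- ===== CLAIM (what is proved, stated in full; the proofs are below) =====
def Claim_equal_int_to_bitstr : Prop := ∀ (bit : Int), Dom_int_to_bitstr bit → Spec_int_to_bitstr bit (int_to_bitstr bit)

-- ===== LEMMAS AND PROOFS =====

theorem pvBinNat_zero : pvBinNat 0 = [] := by
  rw [pvBinNat]; rfl

theorem pvPad_eq_aux (c : Char) : ∀ (k : Nat) (s : List Char), 32 - s.length ≤ k →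
    pvPad c s = List.replicate (32 - s.length) c ++ s := by
  intro k
  induction k with
  | zero =>
    intro s hs
    rw [pvPad.eq_def]
    have h : ¬ s.length < 32 := by omega
    rw [if_neg h, Nat.sub_eq_zero_of_le (by omega), List.replicate_zero, List.nil_append]
  | succ k ih =>
    intro s hs
    rw [pvPad.eq_def]
    by_cases h : s.length < 32
    · simp only [h, if_true]
      rw [ih (c :: s) (by simp [List.length_cons]; omega)]
      have h1 : 32 - s.length = (32 - (c :: s).length) + 1 := by
        simp [List.length_cons]; omega
      rw [h1, List.replicate_succ', List.append_assoc]
      rfl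
    · rw [if_neg h, Nat.sub_eq_zero_of_le (by omega), List.replicate_zero, List.nil_append]

theorem pvPad_eq (c : Char) (s : List Char) :
    pvPad c s = List.replicate (32 - s.length) c ++ s :=
  pvPad_eq_aux c (32 - s.length) s le_rfl

theorem pvBinNat_len : ∀ (w m : Nat), m < 2^w → (pvBinNat m).length ≤ w := by
  intro w
  induction w with
  | zero => intro m hm; interval_cases m; simp [pvBinNat_zero]
  | succ w ih =>
    intro m hm
    by_cases h : m = 0
    · simp [h, pvBinNat_zero]
    · rw [pvBinNat]
      simp only [h, dif_neg, not_false_iff]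
      have h2 : m / 2 < 2^w := by
        rw [pow_succ] at hm; omega
      have := ih (m / 2) h2
      simp; omega

theorem pvBinNat_eq_fmt : ∀ (w m : Nat), m < 2^w →
    List.replicate (w - (pvBinNat m).length) '0' ++ pvBinNat m = pvFmtBits w m := by
  intro w
  induction w with
  | zero => intro m hm; interval_cases m; simp [pvBinNat_zero, pvFmtBits]
  | succ w ih =>
    intro m hm
    by_cases h : m = 0
    · subst h
      have h0' : List.replicate w '0' = pvFmtBits w 0 := by
        simpa [pvBinNat_zero] using ih 0 (Nat.two_pow_pos w)
      rw [pvFmtBits]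
      simp only [pvBinNat_zero, List.append_nil, Nat.zero_div, Nat.zero_mod, List.length_nil,
        Nat.sub_zero]
      rw [← h0']
      simp [List.replicate_succ']
    · rw [pvBinNat]
      simp only [h, dif_neg, not_false_iff]
      have h2 : m / 2 < 2^w := by rw [pow_succ] at hm; omega
      have hlen : (pvBinNat (m / 2) ++ [if m % 2 = 1 then '1' else '0']).length
          = (pvBinNat (m / 2)).length + 1 := by simp
      rw [hlen, Nat.succ_sub_succ, ← List.append_assoc, ih (m / 2) h2]
      rw [pvFmtBits]

theorem pvFmtBits_compl : ∀ (w m : Nat), m < 2^w →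
    pvFmtBits w (2^w - 1 - m) =
      (pvFmtBits w m).map (fun c => if c = '1' then '0' else '1') := by
  intro w
  induction w with
  | zero => intro m hm; simp [pvFmtBits]
  | succ w ih =>
    intro m hm
    have hp : (0:Nat) < 2^w := Nat.two_pow_pos w
    have hpow : 2^(w+1) = 2 * 2^w := by ring
    have h2 : m / 2 < 2^w := by omega
    have hdiv : (2^(w+1) - 1 - m) / 2 = 2^w - 1 - m / 2 := by
      rw [hpow] at hm ⊢; omega
    have hmod : (2^(w+1) - 1 - m) % 2 = 1 - m % 2 := by
      rw [hpow] at hm ⊢; omega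
    rw [pvFmtBits, pvFmtBits, hdiv, hmod, List.map_append, ih (m / 2) h2]
    congr 1
    rcases Nat.mod_two_eq_zero_or_one m with h | h <;> simp [h]

theorem foldl_flip (l acc : List Char) :
    l.foldl (fun acc c => acc ++ [if c = '1' then '0' else '1']) acc
      = acc ++ l.map (fun c => if c = '1' then '0' else '1') := by
  induction l generalizing acc with
  | nil => simp
  | cons x xs ih => simp [List.foldl_cons, ih, List.append_assoc]

-- ===== VERDICT (by name: the statement is the Claim_ definition above) =====
theorem int_to_bitstr_spec : Claim_equal_int_to_bitstr := by
  unfold Claim_equal_int_to_bitstr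
  intro bit hdom
  have hb : -2147483648 ≤ bit ∧ bit ≤ 2147483648 := by
    simpa [Dom_int_to_bitstr, pvDomInt] using hdom
  unfold Spec_int_to_bitstr int_to_bitstr int_to_bitstr_alt
  rw [PySem.Int.mod_eq_emod_of_pos (by norm_num : (0:Int) < 4294967296)]
  have h32 : (2:Nat)^32 = 4294967296 := by norm_num
  by_cases hneg : bit < 0
  · -- negative branch
    have hmod : bit % 4294967296 = bit + 4294967296 := by omega
    have hn : (bit % 4294967296).toNat = 2^32 - 1 - (-bit - 1).toNat := by
      rw [hmod]; omega
    have hm32 : (-bit - 1).toNat < 2^32 := by omega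
    simp only [if_pos hneg]
    rw [hn, pvFmtBits_compl 32 _ hm32]
    by_cases h0 : (-bit - 1).toNat = 0
    · rw [if_pos h0, foldl_flip, h0, pvPad_eq]
      decide
    · rw [if_neg h0, foldl_flip]
      simp only [List.nil_append]
      have hlen := pvBinNat_len 32 _ hm32
      rw [if_neg (by simp only [List.length_map]; omega), pvPad_eq]
      simp only [List.length_map]
      rw [← pvBinNat_eq_fmt 32 _ hm32, List.map_append, List.map_replicate]
      simp
  · -- nonnegative branch
    have hn : (bit % 4294967296).toNat = bit.toNat := by omega
    have hm32 : bit.toNat < 2^32 := by omega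
    simp only [if_neg hneg]
    rw [hn]
    by_cases h0 : bit.toNat = 0
    · rw [if_pos h0, h0, pvPad_eq]
      decide
    · rw [if_neg h0]
      have hlen := pvBinNat_len 32 _ hm32
      rw [if_neg (by omega : ¬ ((pvBinNat bit.toNat).length > 32)), pvPad_eq]
      rw [pvBinNat_eq_fmt 32 _ hm32]
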